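-- pv_equiv track=rewrite | github.com/ZeelRamoliya07/AI202-AI- | LabAssignment/A11/q1.py | forward_check
-- ===== SOURCE A (Python) =====
-- from typing import Optional
--
-- def forward_check(var: str, color: int, domains: dict, graph: dict) -> Optional[dict]:
--     """Remove `color` from neighbours' domains; return None if any domain empties."""
--     new_domains = {d: set(vals) for d, vals in domains.items()}
--     for neighbor in graph[var]:
--         if color in new_domains[neighbor]:
--             new_domains[neighbor].discard(color)
--             if not new_domains[neighbor]:
--                 return None          # domain wipe-out → prune
--     return new_domains
-- ===== SOURCE B (Python) =====
-- from typing import Optional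
--
-- def forward_check(var: str, color: int, domains: dict, graph: dict) -> Optional[dict]:
--     """Two-pass: first scan the neighbours against the ORIGINAL domains (a
--     neighbour's domain empties after removing `color` iff it was exactly
--     {color}), returning None at the first wipe-out; only if the whole scan
--     passes, build the pruned copy in a second loop."""
--     neighbors = graph[var]
--     for n in neighbors:
--         if set(domains[n]) == {color}:
--             return None
--     new_domains = {d: set(vals) for d, vals in domains.items()}
--     for n in neighbors:
--         new_domains[n].discard(color)
--     return new_domains
-- ===== Notes on version B (the rewrite author's own statement) =====
-- stated objective: alternative
-- what changed: B splits A's single copy-then-prune loop into a feasibility scan over the ORIGINAL domains (a neighbour wipes out iff its domain set is exactly {color}), returning None at the first such neighbour before any copying, and only then builds the pruned copy in a separate pass. Pre_ excludes exactly the inputs on which both programs raise KeyError (var missing from graph, or a neighbour missing from domains that is reached before any wipe-out).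
import Mathlib
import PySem

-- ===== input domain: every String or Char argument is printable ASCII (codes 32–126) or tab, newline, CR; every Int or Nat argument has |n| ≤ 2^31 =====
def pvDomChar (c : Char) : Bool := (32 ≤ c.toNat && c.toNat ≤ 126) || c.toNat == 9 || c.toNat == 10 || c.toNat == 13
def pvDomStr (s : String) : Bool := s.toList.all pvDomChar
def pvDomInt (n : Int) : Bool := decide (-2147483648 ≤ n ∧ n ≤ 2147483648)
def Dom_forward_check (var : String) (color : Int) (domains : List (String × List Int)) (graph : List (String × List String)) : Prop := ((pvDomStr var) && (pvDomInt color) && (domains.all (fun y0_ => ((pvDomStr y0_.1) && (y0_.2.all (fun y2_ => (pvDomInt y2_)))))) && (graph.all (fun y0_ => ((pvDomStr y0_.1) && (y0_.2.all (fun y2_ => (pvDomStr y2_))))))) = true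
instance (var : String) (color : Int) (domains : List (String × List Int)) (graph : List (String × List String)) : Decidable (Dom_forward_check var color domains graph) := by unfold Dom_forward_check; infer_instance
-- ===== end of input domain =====

-- B separates A's copy-then-prune loop into a wipe-out scan over the original
-- domains followed by a construction pass (alternative decomposition, same cost).


-- ===== PORT A =====
-- A's single loop: for neighbor in graph[var], discard color from the (copied) domain, None on wipe-out.
def fcLoopA (color : Int) : List String → PySem.Dict String (List Int) → Option (PySem.Dict String (List Int))
  | [], nd => some nd
  | n :: rest, nd =>
    let s := nd.getD n []          -- new_domains[neighbor]; Pre_ guarantees the key is present when reached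
    if color ∈ s then
      let s' := PySem.Set.discard s color
      if s' = [] then none
      else fcLoopA color rest (nd.insert n s')
    else fcLoopA color rest nd

def forward_check (var : String) (color : Int) (domains : List (String × List Int)) (graph : List (String × List String)) : Option (List (String × List Int)) :=
  let dom := PySem.Dict.ofList domains
  let g := PySem.Dict.ofList graph
  -- new_domains = {d: set(vals) for d, vals in domains.items()}
  let nd0 : PySem.Dict String (List Int) :=
    PySem.Dict.ofList (dom.items.map (fun p => (p.1, PySem.Set.ofList p.2)))
  match g.get? var with
  | none => none                    -- graph[var] raises KeyError: outside Pre_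
  | some ns => (fcLoopA color ns nd0).map PySem.Dict.items

-- ===== PORT B =====
-- B's pass 1: walk the neighbours, stop at the first whose ORIGINAL domain set is exactly {color}.
def fcScanB (color : Int) (dom : PySem.Dict String (List Int)) : List String → Bool
  | [] => false
  | n :: rest =>
    if PySem.Set.equal (PySem.Set.ofList (dom.getD n [])) [color] then true
    else fcScanB color dom rest

def forward_check_alt (var : String) (color : Int) (domains : List (String × List Int)) (graph : List (String × List String)) : Option (List (String × List Int)) :=
  let dom := PySem.Dict.ofList domains
  let g := PySem.Dict.ofList graph
  match g.get? var with
  | none => none                    -- graph[var] raises KeyError: outside Pre_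
  | some ns =>
    if fcScanB color dom ns then none
    else
      -- pass 2: copy, then discard color from every neighbour's set
      let nd : PySem.Dict String (List Int) :=
        PySem.Dict.ofList (dom.items.map (fun p => (p.1, PySem.Set.ofList p.2)))
      some (ns.foldl (fun d n => d.modify n [] (fun s => PySem.Set.discard s color)) nd).items

-- ===== PRECONDITION & SPEC =====
-- Pre_ excludes exactly the inputs on which both programs raise KeyError: var missing from graph,
-- or a neighbour missing from domains that is reached before any wipe-out (i.e. every earlier
-- neighbour is present and its domain set is not exactly {color}).
def Pre_forward_check (var : String) (color : Int) (domains : List (String × List Int)) (graph : List (String × List String)) : Prop :=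
  (PySem.Dict.ofList graph).contains var = true ∧
  ∀ i < ((PySem.Dict.ofList graph).getD var []).length,
    (∀ m ∈ ((PySem.Dict.ofList graph).getD var []).take i,
        (PySem.Dict.ofList domains).contains m = true ∧
        PySem.Set.equal (PySem.Set.ofList ((PySem.Dict.ofList domains).getD m [])) [color] = false) →
    (PySem.Dict.ofList domains).contains (((PySem.Dict.ofList graph).getD var []).getD i "") = true
instance (var : String) (color : Int) (domains : List (String × List Int)) (graph : List (String × List String)) : Decidable (Pre_forward_check var color domains graph) := by unfold Pre_forward_check; infer_instance
def pvWitness_forward_check : String × Int × (List (String × List Int)) × (List (String × List String)) :=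
  ("a", 1, [("b", [1, 2])], [("a", ["b"])])
def Spec_forward_check (var : String) (color : Int) (domains : List (String × List Int)) (graph : List (String × List String)) (out : Option (List (String × List Int))) : Prop := out = forward_check_alt var color domains graph
instance (var : String) (color : Int) (domains : List (String × List Int)) (graph : List (String × List String)) (out : Option (List (String × List Int))) : Decidable (Spec_forward_check var color domains graph out) := by unfold Spec_forward_check; infer_instance

-- ===== CLAIM (what is proved, stated in full; the proofs are below) =====
def Claim_equal_forward_check : Prop := ∀ (var : String) (color : Int) (domains : List (String × List Int)) (graph : List (String × List String)), Dom_forward_check var color domains graph → Pre_forward_check var color domains graph → Spec_forward_check var color domains graph (forward_check var color domains graph)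

-- ===== LEMMAS AND PROOFS =====

-- replacing the (unique) pair keyed k by its own value is the identity
theorem map_overwrite_eq_self (k : String) (v : List Int) :
    ∀ ps : List (String × List Int), (ps.map Prod.fst).Nodup →
    (List.find? (fun p => p.1 == k) ps).map (·.2) = some v →
    ps.map (fun p => if p.1 == k then (k, v) else p) = ps := by
  intro ps
  induction ps with
  | nil => intro _ h; simp at h
  | cons a t ih =>
    intro hnd hf
    by_cases hak : a.1 = k
    · have hbeq : (a.1 == k) = true := by simpa using hak
      simp only [List.find?_cons, hbeq] at hf
      simp at hf
      have hnot : ∀ p ∈ t, ¬ (p.1 == k) = true := by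
        intro p hp hpk
        have : a.1 ∈ t.map Prod.fst := by
          rw [hak]; exact List.mem_map.mpr ⟨p, hp, by simpa using hpk⟩
        exact (List.nodup_cons.mp (by simpa using hnd)).1 this
      simp only [List.map_cons, hbeq, if_true]
      have htail : List.map (fun p => if (p.1 == k) = true then (k, v) else p) t = t := by
        apply List.map_congr_left (fun p hp => by simp [hnot p hp]) |>.trans (List.map_id t)
      have ha : a = (k, v) := by rw [Prod.ext_iff]; exact ⟨hak, hf⟩
      rw [ha, htail]
    · have hbeq : (a.1 == k) = false := by simpa using hak
      simp only [List.find?_cons, hbeq] at hf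
      simp only [List.map_cons, hbeq, Bool.false_eq_true, if_false]
      rw [ih (List.nodup_cons.mp (by simpa using hnd)).2 hf]

-- overwriting a key with its own value leaves a nodup-keyed dict unchanged
theorem insert_self_of_get? (d : PySem.Dict String (List Int)) (k : String) (v : List Int)
    (hnd : d.keys.Nodup) (hv : d.get? k = some v) : d.insert k v = d := by
  have hc : d.contains k = true := by
    rw [PySem.Dict.contains_eq_isSome_get?, hv]; rfl
  apply PySem.Dict.ext
  rw [PySem.Dict.items_insert_of_contains d v hc]
  exact map_overwrite_eq_self k v d.items (by simpa [PySem.Dict.keys] using hnd) hv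

-- value-map of a nodup-keyed dict: lookup commutes with the mapping
theorem get?_ofList_map_values (d : PySem.Dict String (List Int))
    (hnd : d.keys.Nodup) (k : String) :
    (PySem.Dict.ofList (d.items.map (fun p => (p.1, PySem.Set.ofList p.2)))).get? k
      = (d.get? k).map PySem.Set.ofList := by
  have hfst : ((d.items.map (fun p => (p.1, PySem.Set.ofList p.2))).map Prod.fst).Nodup := by
    rw [List.map_map]
    simpa [PySem.Dict.keys, Function.comp] using hnd
  have hitems : (PySem.Dict.ofList (d.items.map (fun p => (p.1, PySem.Set.ofList p.2)))).items
      = d.items.map (fun p => (p.1, PySem.Set.ofList p.2)) := by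
    have := PySem.Dict.items_foldl_insert_fresh
      (d.items.map (fun p => (p.1, PySem.Set.ofList p.2))) Prod.fst Prod.snd PySem.Dict.empty
      (by intro a _; exact PySem.Dict.contains_empty a.1) hfst
    simpa [PySem.Dict.ofList, PySem.Dict.update] using this
  have hfind : List.find? (fun p => p.1 == k) (d.items.map (fun p => (p.1, PySem.Set.ofList p.2)))
      = (List.find? (fun p => p.1 == k) d.items).map (fun p => (p.1, PySem.Set.ofList p.2)) := by
    rw [List.find?_map]
    rfl
  show ((PySem.Dict.ofList _).items.find? _).map _ = _
  rw [hitems, hfind]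
  show _ = Option.map PySem.Set.ofList ((List.find? (fun p => p.1 == k) d.items).map (fun x => x.2))
  cases List.find? (fun p => p.1 == k) d.items <;> rfl

-- main loop correspondence: A's prune loop agrees with B's scan-then-build
theorem loopA_eq (color : Int) (dom : PySem.Dict String (List Int)) :
    ∀ (ns : List String) (nd : PySem.Dict String (List Int)) (p : String → Bool),
    nd.keys.Nodup →
    (∀ i < ns.length,
      (∀ m ∈ ns.take i, dom.contains m = true ∧
          PySem.Set.equal (PySem.Set.ofList (dom.getD m [])) [color] = false) →
      dom.contains (ns.getD i "") = true) →
    (∀ k, nd.get? k = (dom.get? k).map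
      (fun v => if p k then PySem.Set.discard (PySem.Set.ofList v) color else PySem.Set.ofList v)) →
    (∀ k, p k = true → ¬ PySem.Set.equal (PySem.Set.ofList (dom.getD k [])) [color] = true) →
    fcLoopA color ns nd =
      (if fcScanB color dom ns then none
       else some (ns.foldl (fun d n => d.modify n [] (fun s => PySem.Set.discard s color)) nd)) := by
  intro ns
  induction ns with
  | nil => intro nd p _ _ _ _; simp [fcLoopA, fcScanB]
  | cons n rest ih =>
    intro nd p hkeys hPre hinv hp
    have hc : dom.contains n = true := by
      have := hPre 0 (by simp) (by simp)
      simpa using this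
    obtain ⟨v, hv⟩ : ∃ v, dom.get? n = some v := by
      rw [PySem.Dict.contains_eq_isSome_get?] at hc
      exact Option.isSome_iff_exists.mp hc
    have hgv : dom.getD n [] = v := PySem.Dict.getD_of_get?_eq_some dom [] hv
    set S : PySem.Set Int := PySem.Set.ofList v with hS
    have hndn : nd.get? n = some (if p n then PySem.Set.discard S color else S) := by
      rw [hinv n, hv]; rfl
    have hs : nd.getD n [] = (if p n then PySem.Set.discard S color else S) :=
      PySem.Dict.getD_of_get?_eq_some nd [] hndn
    have hbad_iff : (PySem.Set.equal (PySem.Set.ofList (dom.getD n [])) [color] = true)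
        ↔ (color ∈ S ∧ ∀ x ∈ S, x = color) := by
      rw [hgv, ← hS, PySem.Set.equal_iff]
      constructor
      · intro h
        refine ⟨(h color).mpr (by simp), fun x hx => by simpa using (h x).mp hx⟩
      · intro ⟨h1, h2⟩ x
        constructor
        · intro hx; simpa using h2 x hx
        · intro hx; simp at hx; rwa [hx]
    by_cases hbadn : PySem.Set.equal (PySem.Set.ofList (dom.getD n [])) [color] = true
    · -- wipe-out at the head: both sides return none
      have hpn : p n = false := by
        by_contra h
        exact hp n (by simpa using h) hbadn
      have hsS : nd.getD n [] = S := by rw [hs, hpn]; simp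
      obtain ⟨hcS, hall⟩ := hbad_iff.mp hbadn
      have hcs : color ∈ nd.getD n [] := hsS ▸ hcS
      have hwipe : PySem.Set.discard (nd.getD n []) color = [] := by
        rw [hsS]
        exact List.filter_eq_nil_iff.mpr (fun x hx => by simpa using hall x hx)
      rw [show fcLoopA color (n :: rest) nd = none by
            simp only [fcLoopA]; rw [if_pos hcs, if_pos hwipe]]
      rw [show fcScanB color dom (n :: rest) = true by
            simp only [fcScanB]; rw [if_pos hbadn]]
      rw [if_pos rfl]
    · have hbad : PySem.Set.equal (PySem.Set.ofList (dom.getD n [])) [color] = false :=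
        Bool.not_eq_true _ ▸ Bool.eq_false_iff.mpr hbadn
      have hscan : fcScanB color dom (n :: rest) = fcScanB color dom rest := by
        simp only [fcScanB]; rw [if_neg hbadn]
      have hPre' : ∀ i < rest.length,
          (∀ m ∈ rest.take i, dom.contains m = true ∧
              PySem.Set.equal (PySem.Set.ofList (dom.getD m [])) [color] = false) →
          dom.contains (rest.getD i "") = true := by
        intro i hi hpref
        have := hPre (i + 1) (by simpa using Nat.succ_lt_succ hi) ?_
        · simpa using this
        · intro m hm
          rw [List.take_succ_cons] at hm
          rcases List.mem_cons.mp hm with rfl | hm'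
          · exact ⟨hc, hbad⟩
          · exact hpref m hm'
      by_cases hpn : p n = true
      · -- already pruned earlier: color ∉ s, A skips; B's discard is a no-op
        have hsd : nd.getD n [] = PySem.Set.discard S color := by rw [hs, if_pos hpn]
        have hcs : color ∉ nd.getD n [] := by
          rw [hsd]; intro h
          exact ((PySem.Set.mem_discard S color color).mp h).2 rfl
        have hdisc : PySem.Set.discard (nd.getD n []) color = nd.getD n [] := by
          rw [hsd]
          simp only [PySem.Set.discard]
          rw [List.filter_filter]
          apply List.filter_congr
          intro x _; simp
        rw [show fcLoopA color (n :: rest) nd = fcLoopA color rest nd by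
              simp only [fcLoopA]; rw [if_neg hcs]]
        rw [ih nd p hkeys hPre' hinv hp]
        have hmod : nd.modify n [] (fun s => PySem.Set.discard s color) = nd := by
          show nd.insert n (PySem.Set.discard (nd.getD n []) color) = nd
          rw [hdisc]
          exact insert_self_of_get? nd n _ hkeys (by rw [hs]; exact hndn)
        rw [hscan, List.foldl_cons, hmod]
      · have hsS : nd.getD n [] = S := by rw [hs]; simp [hpn]
        by_cases hcs : color ∈ nd.getD n []
        · -- A removes color here; no wipe-out possible since the head is not bad
          have hcS : color ∈ S := hsS ▸ hcs
          have hwipe : ¬ PySem.Set.discard (nd.getD n []) color = [] := by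
            intro hw
            apply hbadn
            apply hbad_iff.mpr
            refine ⟨hcS, fun x hx => ?_⟩
            rw [hsS] at hw
            by_contra hne
            exact (List.filter_eq_nil_iff.mp hw x hx) (by simpa using hne)
          have hcont : nd.contains n = true := by
            rw [PySem.Dict.contains_eq_isSome_get?, hndn]; rfl
          set nd' := nd.insert n (PySem.Set.discard (nd.getD n []) color) with hnd'
          rw [show fcLoopA color (n :: rest) nd = fcLoopA color rest nd' by
                simp only [fcLoopA]; rw [if_pos hcs, if_neg hwipe]]
          have hkeys' : nd'.keys.Nodup := by
            rw [hnd', PySem.Dict.keys_insert_of_contains nd _ hcont]; exact hkeys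
          have hinv' : ∀ k, nd'.get? k = (dom.get? k).map
              (fun w => if (p k || k == n) then PySem.Set.discard (PySem.Set.ofList w) color
                        else PySem.Set.ofList w) := by
            intro k
            rw [hnd', PySem.Dict.get?_insert]
            by_cases hk : k = n
            · subst hk
              rw [if_pos rfl, hv, hsS, hS]
              simp
            · rw [if_neg hk, hinv k]
              have : (k == n) = false := by simpa using hk
              simp [this]
          have hp' : ∀ k, (p k || k == n) = true →
              ¬ PySem.Set.equal (PySem.Set.ofList (dom.getD k [])) [color] = true := by
            intro k hk
            rcases Bool.or_eq_true_iff.mp hk with h | h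
            · exact hp k h
            · have : k = n := by simpa using h
              subst this
              exact hbadn
          rw [ih nd' (fun k => p k || k == n) hkeys' hPre' hinv' hp']
          have hmod : nd.modify n [] (fun s => PySem.Set.discard s color) = nd' := rfl
          rw [hscan, List.foldl_cons, hmod]
        · -- color not present: A skips; B's discard is a no-op
          have hdisc : PySem.Set.discard (nd.getD n []) color = nd.getD n [] := by
            simp only [PySem.Set.discard]
            apply List.filter_eq_self.mpr
            intro x hx
            simp only [Bool.not_eq_eq_eq_not, Bool.not_true]
            by_contra hxe
            simp at hxe
            exact hcs (hxe ▸ hx)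
          rw [show fcLoopA color (n :: rest) nd = fcLoopA color rest nd by
                simp only [fcLoopA]; rw [if_neg hcs]]
          rw [ih nd p hkeys hPre' hinv hp]
          have hmod : nd.modify n [] (fun s => PySem.Set.discard s color) = nd := by
            show nd.insert n (PySem.Set.discard (nd.getD n []) color) = nd
            rw [hdisc]
            exact insert_self_of_get? nd n _ hkeys (by rw [hs]; exact hndn)
          rw [hscan, List.foldl_cons, hmod]

-- ===== VERDICT (by name: the statement is the Claim_ definition above) =====
theorem forward_check_spec : Claim_equal_forward_check := by
  intro var color domains graph _ hpre
  obtain ⟨hvar, hPre⟩ := hpre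
  unfold Spec_forward_check
  obtain ⟨ns, hns⟩ : ∃ ns, (PySem.Dict.ofList graph).get? var = some ns := by
    rw [PySem.Dict.contains_eq_isSome_get?] at hvar
    exact Option.isSome_iff_exists.mp hvar
  have hgd : (PySem.Dict.ofList graph).getD var [] = ns :=
    PySem.Dict.getD_of_get?_eq_some _ [] hns
  rw [hgd] at hPre
  have hnodup : (PySem.Dict.ofList domains).keys.Nodup := PySem.Dict.nodup_keys_ofList domains
  have hnd0 : (PySem.Dict.ofList ((PySem.Dict.ofList domains).items.map
      (fun p => (p.1, PySem.Set.ofList p.2)))).keys.Nodup := PySem.Dict.nodup_keys_ofList _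
  have hinv0 : ∀ k, (PySem.Dict.ofList ((PySem.Dict.ofList domains).items.map
      (fun p => (p.1, PySem.Set.ofList p.2)))).get? k
      = ((PySem.Dict.ofList domains).get? k).map
          (fun v => if (fun _ => false) k then PySem.Set.discard (PySem.Set.ofList v) color
                    else PySem.Set.ofList v) := by
    intro k
    rw [get?_ofList_map_values _ hnodup k]
    rfl
  have hloop := loopA_eq color (PySem.Dict.ofList domains) ns _ (fun _ => false)
    hnd0 hPre hinv0 (by intro k h; exact absurd h (by simp))
  show forward_check var color domains graph = forward_check_alt var color domains graph
  unfold forward_check forward_check_alt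
  simp only [hns]
  rw [hloop]
  by_cases hany : fcScanB color (PySem.Dict.ofList domains) ns = true
  · simp [hany]
  · simp only [Bool.not_eq_true] at hany
    simp [hany]
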